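-- pv_equiv track=rewrite | github.com/fareya22/CleanCodeAAgent | backend/batch_analyzer.py | _infer_issue_category
-- ===== SOURCE A (Python) =====
-- def _infer_issue_category(rationale: str, refactoring_type: str) -> str:
--     """
--     Infer the design issue category from the rationale text and refactoring type.
--     Returns one of: god class, feature envy, complexity, modularity, information hiding, unknown.
--     """
--     rat_lower = rationale.lower()
--     ref_lower = refactoring_type.lower()
--
--     if "god class" in rat_lower or "god class" in ref_lower:
--         return "god class"
--     if "feature envy" in rat_lower or "feature envy" in ref_lower:
--         return "feature envy"
--     if any(kw in rat_lower for kw in [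
--         "information hiding", "public field", "encapsulation",
--         "public instance field", "bypasses encapsulation",
--         "exposes public", "direct assignment", "dot-notation"
--     ]):
--         return "information hiding"
--     if any(kw in rat_lower for kw in [
--         "complexity", "inline variable", "inline method",
--         "cyclomatic", "nesting", "single-use", "trivial",
--         "long method", "extract method"
--     ]) or ref_lower in ("inline variable", "inline method", "extract method"):
--         return "complexity"
--     if any(kw in rat_lower for kw in [
--         "modularity", "separation of concerns", "cohesion",
--         "tight coupling", "multiple responsibilit"
--     ]):
--         return "modularity"
--     return "unknown"
-- ===== SOURCE B (Python) =====
-- # Keyword->category index + priority-ranked min over the set of matched categories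
-- # (instead of A's ordered if-chain of per-category tests).
--
-- _RANK = {"god class": 0, "feature envy": 1, "information hiding": 2,
--          "complexity": 3, "modularity": 4}
--
-- # substring keywords searched in the rationale, each mapped to its category
-- _RAT_KEYWORDS = {
--     "god class": "god class",
--     "feature envy": "feature envy",
--     "information hiding": "information hiding",
--     "public field": "information hiding",
--     "encapsulation": "information hiding",
--     "public instance field": "information hiding",
--     "bypasses encapsulation": "information hiding",
--     "exposes public": "information hiding",
--     "direct assignment": "information hiding",
--     "dot-notation": "information hiding",
--     "complexity": "complexity",
--     "inline variable": "complexity",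
--     "inline method": "complexity",
--     "cyclomatic": "complexity",
--     "nesting": "complexity",
--     "single-use": "complexity",
--     "trivial": "complexity",
--     "long method": "complexity",
--     "extract method": "complexity",
--     "modularity": "modularity",
--     "separation of concerns": "modularity",
--     "cohesion": "modularity",
--     "tight coupling": "modularity",
--     "multiple responsibilit": "modularity",
-- }
--
-- # substring keywords searched in the refactoring type
-- _REF_KEYWORDS = {"god class": "god class", "feature envy": "feature envy"}
--
-- # whole-string matches on the refactoring type
-- _REF_EXACT = {"inline variable": "complexity", "inline method": "complexity",
--               "extract method": "complexity"}
--
--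
-- def _infer_issue_category(rationale: str, refactoring_type: str) -> str:
--     rat = rationale.lower()
--     ref = refactoring_type.lower()
--     hits = {cat for kw, cat in _RAT_KEYWORDS.items() if kw in rat}
--     hits.update(cat for kw, cat in _REF_KEYWORDS.items() if kw in ref)
--     exact = _REF_EXACT.get(ref)
--     if exact is not None:
--         hits.add(exact)
--     return min(hits, key=_RANK.__getitem__) if hits else "unknown"
-- ===== Notes on version B (the rewrite author's own statement) =====
-- stated objective: alternative
-- what changed: Replaced the ordered per-category if-chain by a keyword-to-category index: collect the set of ALL matched categories in one pass over a flat keyword map, then return the highest-priority one via min over a rank table.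
import Mathlib
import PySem

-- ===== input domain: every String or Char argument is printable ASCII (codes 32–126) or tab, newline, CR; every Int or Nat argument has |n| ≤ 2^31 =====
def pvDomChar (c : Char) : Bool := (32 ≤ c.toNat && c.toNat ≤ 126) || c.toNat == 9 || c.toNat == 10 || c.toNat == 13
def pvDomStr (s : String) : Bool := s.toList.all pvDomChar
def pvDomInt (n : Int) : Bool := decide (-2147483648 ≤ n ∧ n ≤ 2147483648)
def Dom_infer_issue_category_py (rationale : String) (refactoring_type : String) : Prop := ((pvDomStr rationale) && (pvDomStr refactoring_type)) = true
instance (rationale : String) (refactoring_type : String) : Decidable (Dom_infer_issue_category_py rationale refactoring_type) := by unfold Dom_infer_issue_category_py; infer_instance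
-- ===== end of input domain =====

-- B replaces A's ordered per-category if-chain by a flat keyword->category index: it collects the
-- set of ALL matched categories and returns the best one by a priority rank (objective: alternative).


-- ===== PORT A =====
def infer_issue_category_py (rationale : String) (refactoring_type : String) : String :=
  let rat_lower := PySem.Str.lower rationale
  let ref_lower := PySem.Str.lower refactoring_type
  if PySem.Str.isIn "god class" rat_lower || PySem.Str.isIn "god class" ref_lower then "god class"
  else if PySem.Str.isIn "feature envy" rat_lower || PySem.Str.isIn "feature envy" ref_lower then "feature envy"
  else if (["information hiding", "public field", "encapsulation",
            "public instance field", "bypasses encapsulation",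
            "exposes public", "direct assignment", "dot-notation"] : List String).any
            (fun kw => PySem.Str.isIn kw rat_lower) then "information hiding"
  else if (["complexity", "inline variable", "inline method",
            "cyclomatic", "nesting", "single-use", "trivial",
            "long method", "extract method"] : List String).any
            (fun kw => PySem.Str.isIn kw rat_lower)
          || (ref_lower == "inline variable" || ref_lower == "inline method" || ref_lower == "extract method")
          then "complexity"
  else if (["modularity", "separation of concerns", "cohesion",
            "tight coupling", "multiple responsibilit"] : List String).any
            (fun kw => PySem.Str.isIn kw rat_lower) then "modularity"
  else "unknown"

-- ===== PORT B =====
def pvRank : PySem.Dict String Int :=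
  PySem.Dict.ofList [("god class", 0), ("feature envy", 1), ("information hiding", 2),
                     ("complexity", 3), ("modularity", 4)]

def pvRatKeywords : List (String × String) :=
  [("god class", "god class"),
   ("feature envy", "feature envy"),
   ("information hiding", "information hiding"),
   ("public field", "information hiding"),
   ("encapsulation", "information hiding"),
   ("public instance field", "information hiding"),
   ("bypasses encapsulation", "information hiding"),
   ("exposes public", "information hiding"),
   ("direct assignment", "information hiding"),
   ("dot-notation", "information hiding"),
   ("complexity", "complexity"),
   ("inline variable", "complexity"),
   ("inline method", "complexity"),
   ("cyclomatic", "complexity"),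
   ("nesting", "complexity"),
   ("single-use", "complexity"),
   ("trivial", "complexity"),
   ("long method", "complexity"),
   ("extract method", "complexity"),
   ("modularity", "modularity"),
   ("separation of concerns", "modularity"),
   ("cohesion", "modularity"),
   ("tight coupling", "modularity"),
   ("multiple responsibilit", "modularity")]

def pvRefKeywords : List (String × String) :=
  [("god class", "god class"), ("feature envy", "feature envy")]

def pvRefExact : PySem.Dict String String :=
  PySem.Dict.ofList [("inline variable", "complexity"), ("inline method", "complexity"),
                     ("extract method", "complexity")]

def infer_issue_category_py_alt (rationale : String) (refactoring_type : String) : String :=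
  let rat := PySem.Str.lower rationale
  let ref := PySem.Str.lower refactoring_type
  let hits : PySem.Set String :=
    PySem.Set.ofList ((pvRatKeywords.filter (fun p => PySem.Str.isIn p.1 rat)).map (·.2))
  let hits := PySem.Set.update hits ((pvRefKeywords.filter (fun p => PySem.Str.isIn p.1 ref)).map (·.2))
  let hits := match PySem.Dict.get? pvRefExact ref with
    | some c => PySem.Set.add hits c
    | none => hits
  match PySem.List.min? hits (fun c => PySem.Dict.getD pvRank c 0) with
  | some c => c
  | none => "unknown"

-- ===== PRECONDITION & SPEC =====
def Spec_infer_issue_category_py (rationale : String) (refactoring_type : String) (out : String) : Prop := out = infer_issue_category_py_alt rationale refactoring_type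
instance (rationale : String) (refactoring_type : String) (out : String) : Decidable (Spec_infer_issue_category_py rationale refactoring_type out) := by unfold Spec_infer_issue_category_py; infer_instance

-- ===== CLAIM (what is proved, stated in full; the proofs are below) =====
def Claim_equal_infer_issue_category_py : Prop := ∀ (rationale : String) (refactoring_type : String), Dom_infer_issue_category_py rationale refactoring_type → Spec_infer_issue_category_py rationale refactoring_type (infer_issue_category_py rationale refactoring_type)

-- ===== LEMMAS AND PROOFS =====
def pvCats : List String := ["god class", "feature envy", "information hiding", "complexity", "modularity"]

def pvRankOf (c : String) : Int := PySem.Dict.getD pvRank c 0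

def pvHits (rat ref : String) : PySem.Set String :=
  let h0 : PySem.Set String :=
    PySem.Set.ofList ((pvRatKeywords.filter (fun p => PySem.Str.isIn p.1 rat)).map (·.2))
  let h1 := PySem.Set.update h0 ((pvRefKeywords.filter (fun p => PySem.Str.isIn p.1 ref)).map (·.2))
  match PySem.Dict.get? pvRefExact ref with
  | some c => PySem.Set.add h1 c
  | none => h1

lemma pv_alt_eq (r t : String) : infer_issue_category_py_alt r t =
    (match PySem.List.min? (pvHits (PySem.Str.lower r) (PySem.Str.lower t)) pvRankOf with
     | some c => c
     | none => "unknown") := rfl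

lemma pv_refExact_eq : pvRefExact = PySem.Dict.mk
    [("inline variable", "complexity"), ("inline method", "complexity"), ("extract method", "complexity")] := by
  decide

lemma pv_get_refExact (ref : String) : PySem.Dict.get? pvRefExact ref =
    (if ref = "inline variable" ∨ ref = "inline method" ∨ ref = "extract method" then some "complexity" else none) := by
  rw [pv_refExact_eq]
  simp only [PySem.Dict.get?_mk_cons]
  by_cases h1 : ref = "inline variable" <;> by_cases h2 : ref = "inline method" <;>
    by_cases h3 : ref = "extract method" <;> (split_ifs <;> simp_all [PySem.Dict.get?])

lemma pv_mem_hits (x rat ref : String) : x ∈ pvHits rat ref ↔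
    ((∃ p ∈ pvRatKeywords, PySem.Str.isIn p.1 rat = true ∧ p.2 = x) ∨
     (∃ p ∈ pvRefKeywords, PySem.Str.isIn p.1 ref = true ∧ p.2 = x) ∨
     ((ref = "inline variable" ∨ ref = "inline method" ∨ ref = "extract method") ∧ x = "complexity")) := by
  unfold pvHits
  rw [pv_get_refExact]
  split_ifs with h
  · simp only [PySem.Set.mem_add, PySem.Set.mem_update, PySem.Set.mem_ofList, List.mem_map,
      List.mem_filter]
    constructor
    · rintro ((⟨p, ⟨hp, hf⟩, he⟩ | ⟨p, ⟨hp, hf⟩, he⟩) | he)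
      · exact Or.inl ⟨p, hp, hf, he⟩
      · exact Or.inr (Or.inl ⟨p, hp, hf, he⟩)
      · exact Or.inr (Or.inr ⟨h, he⟩)
    · rintro (⟨p, hp, hf, he⟩ | ⟨p, hp, hf, he⟩ | ⟨_, he⟩)
      · exact Or.inl (Or.inl ⟨p, ⟨hp, hf⟩, he⟩)
      · exact Or.inl (Or.inr ⟨p, ⟨hp, hf⟩, he⟩)
      · exact Or.inr he
  · simp only [PySem.Set.mem_update, PySem.Set.mem_ofList, List.mem_map, List.mem_filter]
    constructor
    · rintro (⟨p, ⟨hp, hf⟩, he⟩ | ⟨p, ⟨hp, hf⟩, he⟩)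
      · exact Or.inl ⟨p, hp, hf, he⟩
      · exact Or.inr (Or.inl ⟨p, hp, hf, he⟩)
    · rintro (⟨p, hp, hf, he⟩ | ⟨p, hp, hf, he⟩ | ⟨hr, _⟩)
      · exact Or.inl ⟨p, ⟨hp, hf⟩, he⟩
      · exact Or.inr ⟨p, ⟨hp, hf⟩, he⟩
      · exact absurd hr h

lemma pv_mem_god (rat ref : String) : "god class" ∈ pvHits rat ref ↔
    (PySem.Str.isIn "god class" rat = true ∨ PySem.Str.isIn "god class" ref = true) := by
  rw [pv_mem_hits]; simp [pvRatKeywords, pvRefKeywords]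

lemma pv_mem_fe (rat ref : String) : "feature envy" ∈ pvHits rat ref ↔
    (PySem.Str.isIn "feature envy" rat = true ∨ PySem.Str.isIn "feature envy" ref = true) := by
  rw [pv_mem_hits]; simp [pvRatKeywords, pvRefKeywords]

lemma pv_mem_ih (rat ref : String) : "information hiding" ∈ pvHits rat ref ↔
    (PySem.Str.isIn "information hiding" rat = true ∨ PySem.Str.isIn "public field" rat = true ∨
     PySem.Str.isIn "encapsulation" rat = true ∨ PySem.Str.isIn "public instance field" rat = true ∨
     PySem.Str.isIn "bypasses encapsulation" rat = true ∨ PySem.Str.isIn "exposes public" rat = true ∨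
     PySem.Str.isIn "direct assignment" rat = true ∨ PySem.Str.isIn "dot-notation" rat = true) := by
  rw [pv_mem_hits]; simp [pvRatKeywords, pvRefKeywords]

lemma pv_mem_cx (rat ref : String) : "complexity" ∈ pvHits rat ref ↔
    ((PySem.Str.isIn "complexity" rat = true ∨ PySem.Str.isIn "inline variable" rat = true ∨
      PySem.Str.isIn "inline method" rat = true ∨ PySem.Str.isIn "cyclomatic" rat = true ∨
      PySem.Str.isIn "nesting" rat = true ∨ PySem.Str.isIn "single-use" rat = true ∨
      PySem.Str.isIn "trivial" rat = true ∨ PySem.Str.isIn "long method" rat = true ∨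
      PySem.Str.isIn "extract method" rat = true) ∨
     ((ref = "inline variable" ∨ ref = "inline method") ∨ ref = "extract method")) := by
  rw [pv_mem_hits]; simp [pvRatKeywords, pvRefKeywords]; tauto

lemma pv_mem_mod (rat ref : String) : "modularity" ∈ pvHits rat ref ↔
    (PySem.Str.isIn "modularity" rat = true ∨ PySem.Str.isIn "separation of concerns" rat = true ∨
     PySem.Str.isIn "cohesion" rat = true ∨ PySem.Str.isIn "tight coupling" rat = true ∨
     PySem.Str.isIn "multiple responsibilit" rat = true) := by
  rw [pv_mem_hits]; simp [pvRatKeywords, pvRefKeywords]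

lemma pv_hits_sub_cats (x rat ref : String) (hx : x ∈ pvHits rat ref) : x ∈ pvCats := by
  rw [pv_mem_hits] at hx
  rcases hx with ⟨p, hp, _, he⟩ | ⟨p, hp, _, he⟩ | ⟨_, he⟩ <;>
    first
    | (subst he; fin_cases hp <;> decide)
    | (subst he; decide)

lemma pv_rank_inj (m c : String) (hm : m ∈ pvCats) (hc : c ∈ pvCats)
    (h : pvRankOf m = pvRankOf c) : m = c := by
  fin_cases hm <;> fin_cases hc <;> revert h <;> decide

lemma pv_min_eq (L : List String) (c : String) (hsub : ∀ x ∈ L, x ∈ pvCats) (hc : c ∈ L)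
    (hmin : ∀ x ∈ L, pvRankOf c ≤ pvRankOf x) :
    PySem.List.min? L pvRankOf = some c := by
  cases h : PySem.List.min? L pvRankOf with
  | none => rw [PySem.List.min?_eq_none_iff] at h; subst h; cases hc
  | some m =>
    have hmL : m ∈ L := PySem.List.min?_mem h
    have h1 : pvRankOf m ≤ pvRankOf c := PySem.List.min?_isMin h c hc
    have h2 : pvRankOf c ≤ pvRankOf m := hmin m hmL
    exact congrArg some (pv_rank_inj m c (hsub m hmL) (hsub c hc) (le_antisymm h1 h2))

-- ===== VERDICT (by name: the statement is the Claim_ definition above) =====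
set_option maxHeartbeats 1000000 in
theorem infer_issue_category_py_spec : Claim_equal_infer_issue_category_py := by
  intro r t _
  unfold Spec_infer_issue_category_py infer_issue_category_py
  rw [pv_alt_eq]
  set rat := PySem.Str.lower r with hr
  set ref := PySem.Str.lower t with ht
  simp only [List.any_cons, List.any_nil, Bool.or_false, Bool.or_eq_true, beq_iff_eq]
  split_ifs with h1 h2 h3 h4 h5
  · rw [pv_min_eq (pvHits rat ref) "god class" (fun x hx => pv_hits_sub_cats x rat ref hx)
      ((pv_mem_god rat ref).mpr h1) ?_]
    intro x hx
    have hcat := pv_hits_sub_cats x rat ref hx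
    fin_cases hcat <;> decide
  · rw [pv_min_eq (pvHits rat ref) "feature envy" (fun x hx => pv_hits_sub_cats x rat ref hx)
      ((pv_mem_fe rat ref).mpr h2) ?_]
    intro x hx
    have hcat := pv_hits_sub_cats x rat ref hx
    fin_cases hcat
    · exact absurd ((pv_mem_god rat ref).mp hx) h1
    all_goals decide
  · rw [pv_min_eq (pvHits rat ref) "information hiding" (fun x hx => pv_hits_sub_cats x rat ref hx)
      ((pv_mem_ih rat ref).mpr h3) ?_]
    intro x hx
    have hcat := pv_hits_sub_cats x rat ref hx
    fin_cases hcat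
    · exact absurd ((pv_mem_god rat ref).mp hx) h1
    · exact absurd ((pv_mem_fe rat ref).mp hx) h2
    all_goals decide
  · rw [pv_min_eq (pvHits rat ref) "complexity" (fun x hx => pv_hits_sub_cats x rat ref hx)
      ((pv_mem_cx rat ref).mpr h4) ?_]
    intro x hx
    have hcat := pv_hits_sub_cats x rat ref hx
    fin_cases hcat
    · exact absurd ((pv_mem_god rat ref).mp hx) h1
    · exact absurd ((pv_mem_fe rat ref).mp hx) h2
    · exact absurd ((pv_mem_ih rat ref).mp hx) h3
    all_goals decide
  · rw [pv_min_eq (pvHits rat ref) "modularity" (fun x hx => pv_hits_sub_cats x rat ref hx)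
      ((pv_mem_mod rat ref).mpr h5) ?_]
    intro x hx
    have hcat := pv_hits_sub_cats x rat ref hx
    fin_cases hcat
    · exact absurd ((pv_mem_god rat ref).mp hx) h1
    · exact absurd ((pv_mem_fe rat ref).mp hx) h2
    · exact absurd ((pv_mem_ih rat ref).mp hx) h3
    · exact absurd ((pv_mem_cx rat ref).mp hx) h4
    · decide
  · have hempty : pvHits rat ref = [] := by
      rw [List.eq_nil_iff_forall_not_mem]
      intro x hx
      have hcat := pv_hits_sub_cats x rat ref hx
      fin_cases hcat
      · exact absurd ((pv_mem_god rat ref).mp hx) h1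
      · exact absurd ((pv_mem_fe rat ref).mp hx) h2
      · exact absurd ((pv_mem_ih rat ref).mp hx) h3
      · exact absurd ((pv_mem_cx rat ref).mp hx) h4
      · exact absurd ((pv_mem_mod rat ref).mp hx) h5
    rw [hempty]
    rfl
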